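-- pv_equiv track=rewrite | github.com/Paradox-455M/local-code-agent | agent/context_builder.py | _group_nearby_lines
-- ===== SOURCE A (Python) =====
-- from typing import List, Dict, Set, Optional, Tuple
--
-- def _group_nearby_lines(lines: List[int], max_gap: int = 10) -> List[List[int]]:
--     """Group nearby line numbers together."""
--     if not lines:
--         return []
--
--     groups: List[List[int]] = []
--     current_group = [lines[0]]
--
--     for line in lines[1:]:
--         if line - current_group[-1] <= max_gap:
--             current_group.append(line)
--         else:
--             groups.append(current_group)
--             current_group = [line]
--
--     if current_group:
--         groups.append(current_group)
--
--     return groups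
-- ===== SOURCE B (Python) =====
-- from typing import List
--
-- def _group_nearby_lines(lines: List[int], max_gap: int = 10) -> List[List[int]]:
--     """Two-phase: collect split boundaries, then partition by slicing between them."""
--     if not lines:
--         return []
--     # phase 1: boundary indices where the gap to the previous line exceeds max_gap
--     splits = [i for i in range(1, len(lines)) if lines[i] - lines[i - 1] > max_gap]
--     # phase 2: slice the list between successive boundaries
--     bounds = [0] + splits + [len(lines)]
--     return [lines[a:b] for a, b in zip(bounds, bounds[1:])]
-- ===== Notes on version B (the rewrite author's own statement) =====
-- stated objective: alternative
-- what changed: Replaces A's incremental scan with a current_group buffer and flush branch by a two-phase strategy: first collect the split indices (where the gap to the previous line exceeds max_gap), then build the groups by slicing the list between successive boundaries.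
import Mathlib
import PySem

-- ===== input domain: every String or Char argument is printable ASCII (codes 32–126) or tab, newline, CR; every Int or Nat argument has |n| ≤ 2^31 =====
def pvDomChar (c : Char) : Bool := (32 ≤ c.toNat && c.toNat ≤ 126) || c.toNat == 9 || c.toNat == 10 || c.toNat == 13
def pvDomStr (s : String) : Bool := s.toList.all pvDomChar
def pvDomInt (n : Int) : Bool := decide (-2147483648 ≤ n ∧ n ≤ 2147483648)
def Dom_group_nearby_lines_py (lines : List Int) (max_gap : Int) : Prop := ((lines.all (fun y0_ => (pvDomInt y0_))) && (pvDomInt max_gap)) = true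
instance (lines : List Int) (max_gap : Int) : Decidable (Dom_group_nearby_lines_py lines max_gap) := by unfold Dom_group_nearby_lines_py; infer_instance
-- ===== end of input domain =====

-- B replaces A's incremental scan-and-flush construction by a two-phase strategy:
-- collect the split indices, then partition the list by slicing between successive
-- boundaries (objective: alternative decomposition, same cost).

-- ===== PORT A =====
-- loop body of A: current_group[-1] is read via getLast! — exact, the buffer is never empty
def pvStepA (max_gap : Int) (st : List (List Int) × List Int) (line : Int) :
    List (List Int) × List Int :=
  if line - st.2.getLast! ≤ max_gap then (st.1, st.2 ++ [line])
  else (st.1 ++ [st.2], [line])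

def group_nearby_lines_py (lines : List Int) (max_gap : Int) : List (List Int) :=
  match lines with
  | [] => []
  | l0 :: rest =>                                   -- lines[0], lines[1:]
    let st := rest.foldl (pvStepA max_gap) ([], [l0])
    if st.2 ≠ [] then st.1 ++ [st.2] else st.1      -- "if current_group: groups.append(...)"

-- ===== PORT B =====
-- phase 1 comprehension: lines[i] / lines[i-1] via pyGetD — exact, i ∈ range(1, len) is always in range
def group_nearby_lines_py_alt (lines : List Int) (max_gap : Int) : List (List Int) :=
  if lines = [] then []
  else
    let n : Int := (lines.length : Int)
    let splits : List Int := (PySem.List.pyRange 1 n 1).filter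
      (fun i => decide (max_gap < PySem.List.pyGetD lines i 0 - PySem.List.pyGetD lines (i - 1) 0))
    let bounds : List Int := 0 :: splits ++ [n]                         -- [0] + splits + [len(lines)]
    (bounds.zip (PySem.List.slice bounds (some 1) none)).map            -- zip(bounds, bounds[1:])
      (fun ab => PySem.List.slice lines (some ab.1) (some ab.2))        -- lines[a:b]

-- ===== PRECONDITION & SPEC =====
def Spec_group_nearby_lines_py (lines : List Int) (max_gap : Int) (out : List (List Int)) : Prop := out = group_nearby_lines_py_alt lines max_gap
instance (lines : List Int) (max_gap : Int) (out : List (List Int)) : Decidable (Spec_group_nearby_lines_py lines max_gap out) := by unfold Spec_group_nearby_lines_py; infer_instance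

-- ===== CLAIM (what is proved, stated in full; the proofs are below) =====
def Claim_equal_group_nearby_lines_py : Prop := ∀ (lines : List Int) (max_gap : Int), Dom_group_nearby_lines_py lines max_gap → Spec_group_nearby_lines_py lines max_gap (group_nearby_lines_py lines max_gap)

-- ===== LEMMAS AND PROOFS =====

-- canonical grouping: split x::xs before y (head of xs) iff y - x > g
def pvGrp (g : Int) : List Int → List (List Int)
  | [] => []
  | [x] => [[x]]
  | x :: y :: ys =>
    match pvGrp g (y :: ys) with
    | [] => [[x]]
    | h :: t => if y - x ≤ g then (x :: h) :: t else [x] :: h :: t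

-- A's post-loop flush
def pvFin (st : List (List Int) × List Int) : List (List Int) :=
  if st.2 ≠ [] then st.1 ++ [st.2] else st.1

theorem pvGrp_cons (g : Int) : ∀ (xs : List Int) (x : Int),
    ∃ h t, pvGrp g (x :: xs) = (x :: h) :: t := by
  intro xs
  induction xs with
  | nil => intro x; exact ⟨[], [], rfl⟩
  | cons y ys ih =>
    intro x
    obtain ⟨h, t, hy⟩ := ih y
    simp only [pvGrp, hy]
    split_ifs
    · exact ⟨y :: h, t, rfl⟩
    · exact ⟨[], (y :: h) :: t, rfl⟩

-- A's loop as structural recursion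
def pvAgr (g : Int) : List Int → List Int → List (List Int)
  | cur, [] => [cur]
  | cur, x :: xs =>
    if x - cur.getLast! ≤ g then pvAgr g (cur ++ [x]) xs else cur :: pvAgr g [x] xs

theorem pvAgr_cons (g : Int) (cur : List Int) (x : Int) (xs : List Int) :
    pvAgr g cur (x :: xs) =
      if x - cur.getLast! ≤ g then pvAgr g (cur ++ [x]) xs else cur :: pvAgr g [x] xs := rfl

theorem pvAgr_foldl (g : Int) : ∀ (xs : List Int) (gs : List (List Int)) (cur : List Int),
    cur ≠ [] →
    pvFin (xs.foldl (pvStepA g) (gs, cur)) = gs ++ pvAgr g cur xs := by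
  intro xs
  induction xs with
  | nil => intro gs cur hc; simp [pvFin, pvAgr, hc]
  | cons x xs ih =>
    intro gs cur hc
    rw [List.foldl_cons]
    by_cases hcond : x - cur.getLast! ≤ g
    · rw [show pvStepA g (gs, cur) x = (gs, cur ++ [x]) from by unfold pvStepA; rw [if_pos hcond]]
      rw [ih gs (cur ++ [x]) (by simp), pvAgr_cons, if_pos hcond]
    · rw [show pvStepA g (gs, cur) x = (gs ++ [cur], [x]) from by unfold pvStepA; rw [if_neg hcond]]
      rw [ih (gs ++ [cur]) [x] (by simp), pvAgr_cons, if_neg hcond]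
      simp

theorem pvAgr_grp (g : Int) : ∀ (xs cur : List Int) (x : Int) (h : List Int) (t : List (List Int)),
    pvGrp g (x :: xs) = (x :: h) :: t →
    pvAgr g (cur ++ [x]) xs = (cur ++ x :: h) :: t := by
  intro xs
  induction xs with
  | nil =>
    intro cur x h t hg
    simp only [pvGrp] at hg
    simp only [List.cons.injEq, true_and] at hg
    obtain ⟨rfl, rfl⟩ := hg
    simp [pvAgr]
  | cons y ys ih =>
    intro cur x h t hg
    obtain ⟨h', t', hy⟩ := pvGrp_cons g ys y
    simp only [pvGrp, hy] at hg
    have hlast : (cur ++ [x]).getLast! = x := by simp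
    by_cases hcond : y - x ≤ g
    · rw [if_pos hcond] at hg
      simp only [List.cons.injEq, true_and] at hg
      obtain ⟨rfl, rfl⟩ := hg
      rw [pvAgr_cons, hlast, if_pos hcond]
      have := ih (cur ++ [x]) y h' t' hy
      simpa using this
    · rw [if_neg hcond] at hg
      simp only [List.cons.injEq, true_and] at hg
      obtain ⟨rfl, rfl⟩ := hg
      rw [pvAgr_cons, hlast, if_neg hcond]
      have := ih ([] : List Int) y h' t' hy
      simpa using this

theorem pvA_eq_grp (lines : List Int) (g : Int) :
    group_nearby_lines_py lines g = pvGrp g lines := by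
  cases lines with
  | nil => rfl
  | cons l0 rest =>
    obtain ⟨h, t, hg⟩ := pvGrp_cons g rest l0
    have hagr : pvAgr g ([] ++ [l0]) rest = ([] ++ l0 :: h) :: t := pvAgr_grp g rest [] l0 h t hg
    simp only [List.nil_append] at hagr
    show pvFin (rest.foldl (pvStepA g) ([], [l0])) = pvGrp g (l0 :: rest)
    rw [pvAgr_foldl g rest [] [l0] (by simp), hagr, hg]
    simp

-- ===== B-side model: Nat-level splits, relative-index partition, absolute-index chopping =====

def pvSplits (g : Int) (xs : List Int) : List Nat :=
  (List.range' 1 (xs.length - 1)).filter (fun i => decide (g < xs.getD i 0 - xs.getD (i - 1) 0))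

def pvPieces : List Int → List Nat → List (List Int)
  | xs, [] => [xs]
  | xs, s :: ss => xs.take s :: pvPieces (xs.drop s) (ss.map (· - s))
termination_by _ ss => ss.length
decreasing_by simp

def pvChop (xs : List Int) : Nat → List Nat → List (List Int)
  | _, [] => []
  | a, b :: bs => (xs.drop a).take (b - a) :: pvChop xs b bs

theorem pvSplits_cons2 (g x y : Int) (ys : List Int) :
    pvSplits g (x :: y :: ys) =
      (if g < y - x then [1] else []) ++ (pvSplits g (y :: ys)).map (· + 1) := by
  unfold pvSplits
  have hlen : (x :: y :: ys).length - 1 = ((y :: ys).length - 1) + 1 := by simp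
  have hmap : List.range' 2 ((y :: ys).length - 1)
      = (List.range' 1 ((y :: ys).length - 1)).map (· + 1) := by
    simp [List.range'_eq_map_range]; intro a _; omega
  rw [hlen, List.range'_succ, List.filter_cons, hmap, List.filter_map]
  have hcong : (List.range' 1 ((y :: ys).length - 1)).filter
      ((fun i => decide (g < (x :: y :: ys).getD i 0 - (x :: y :: ys).getD (i - 1) 0)) ∘ (· + 1))
      = (List.range' 1 ((y :: ys).length - 1)).filter
      (fun i => decide (g < (y :: ys).getD i 0 - (y :: ys).getD (i - 1) 0)) := by
    apply List.filter_congr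
    intro i hi
    rw [List.mem_range'] at hi
    obtain ⟨k, rfl⟩ : ∃ k, i = k + 1 := ⟨i - 1, by omega⟩
    simp
  rw [hcong]
  by_cases hc : g < y - x
  · rw [if_pos (by simp [List.getD]; omega), if_pos hc]; rfl
  · rw [if_neg (by simp [List.getD]; omega), if_neg hc]; rfl

theorem pvPieces_map_succ (x : Int) (xs : List Int) (ss : List Nat) (h : List Int)
    (t : List (List Int)) (hp : pvPieces xs ss = h :: t) :
    pvPieces (x :: xs) (ss.map (· + 1)) = (x :: h) :: t := by
  cases ss with
  | nil =>
    simp only [pvPieces] at hp ⊢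
    simp only [List.cons.injEq] at hp
    obtain ⟨rfl, rfl⟩ := hp
    simp [pvPieces]
  | cons s ss =>
    simp only [pvPieces, List.map_cons] at hp ⊢
    have hm : (ss.map (· + 1)).map (· - (s + 1)) = ss.map (· - s) := by
      rw [List.map_map]; apply List.map_congr_left; intro k _; simp
    rw [hm]
    simp only [List.take_succ_cons, List.drop_succ_cons]
    simp only [List.cons.injEq] at hp
    obtain ⟨rfl, rfl⟩ := hp
    rfl

theorem pvGrp_eq_pieces (g : Int) : ∀ (xs : List Int) (x : Int),
    pvGrp g (x :: xs) = pvPieces (x :: xs) (pvSplits g (x :: xs)) := by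
  intro xs
  induction xs with
  | nil => intro x; simp [pvGrp, pvPieces, pvSplits]
  | cons y ys ih =>
    intro x
    obtain ⟨h, t, hy⟩ := pvGrp_cons g ys y
    rw [pvSplits_cons2]
    by_cases hc : g < y - x
    · rw [if_pos hc]
      have : pvGrp g (x :: y :: ys) = [x] :: pvGrp g (y :: ys) := by
        simp only [pvGrp, hy]
        rw [if_neg (by omega)]
      rw [this, ih y]
      show _ = pvPieces (x :: y :: ys) (1 :: (pvSplits g (y :: ys)).map (· + 1))
      simp only [pvPieces]
      have hm : ((pvSplits g (y :: ys)).map (· + 1)).map (· - 1) = pvSplits g (y :: ys) := by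
        have hid : ((fun x => x - 1) ∘ fun (x : Nat) => x + 1) = id := by
          funext k; simp
        rw [List.map_map, hid, List.map_id]
      rw [hm]
      rfl
    · rw [if_neg hc, List.nil_append]
      have hA : pvGrp g (x :: y :: ys) = (x :: y :: h) :: t := by
        simp only [pvGrp, hy]
        rw [if_pos (by omega)]
      have hB : pvPieces (y :: ys) (pvSplits g (y :: ys)) = (y :: h) :: t := by
        rw [← ih y, hy]
      rw [hA, pvPieces_map_succ x (y :: ys) _ _ _ hB]

theorem pvZip_chop (xs : List Int) : ∀ (bs : List Nat) (a : Nat),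
    (((a :: bs).map (fun k : Nat => (k : Int))).zip (bs.map (fun k : Nat => (k : Int)))).map
        (fun ab => PySem.List.slice xs (some ab.1) (some ab.2)) =
      pvChop xs a bs := by
  intro bs
  induction bs with
  | nil => intro a; rfl
  | cons b bs ih =>
    intro a
    have hstep : (((a :: b :: bs).map (fun k : Nat => (k : Int))).zip
          ((b :: bs).map (fun k : Nat => (k : Int)))).map
          (fun ab => PySem.List.slice xs (some ab.1) (some ab.2))
        = PySem.List.slice xs (some (a : Int)) (some (b : Int)) ::
          (((b :: bs).map (fun k : Nat => (k : Int))).zip (bs.map (fun k : Nat => (k : Int)))).map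
            (fun ab => PySem.List.slice xs (some ab.1) (some ab.2)) := rfl
    rw [hstep, PySem.List.slice_natCast, ih b]
    rfl

theorem pvChop_eq_pieces : ∀ (ss : List Nat) (a : Nat) (xs : List Int),
    List.IsChain (· ≤ ·) (a :: ss ++ [xs.length]) →
    pvChop xs a (ss ++ [xs.length]) = pvPieces (xs.drop a) (ss.map (· - a)) := by
  intro ss
  induction ss with
  | nil =>
    intro a xs hch
    simp only [List.nil_append, List.cons_append, List.isChain_cons_cons] at hch
    show (xs.drop a).take (xs.length - a) :: pvChop xs xs.length [] = pvPieces (xs.drop a) []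
    simp only [pvChop, pvPieces]
    rw [List.take_of_length_le (by simp)]
  | cons s ss ih =>
    intro a xs hch
    simp only [List.cons_append, List.isChain_cons_cons] at hch
    obtain ⟨has, hch⟩ := hch
    show (xs.drop a).take (s - a) :: pvChop xs s (ss ++ [xs.length])
        = pvPieces (xs.drop a) ((s :: ss).map (· - a))
    have hpieces : pvPieces (xs.drop a) ((s :: ss).map (· - a))
        = (xs.drop a).take (s - a) ::
          pvPieces ((xs.drop a).drop (s - a)) ((ss.map (· - a)).map (· - (s - a))) := by
      simp only [List.map_cons, pvPieces]
    rw [hpieces]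
    refine congrArg _ ?_
    rw [ih s xs (by simpa using hch)]
    have hdd : (xs.drop a).drop (s - a) = xs.drop s := by
      rw [List.drop_drop]
      exact congrArg (fun k => xs.drop k) (by omega)
    have hmm : (ss.map (· - a)).map (· - (s - a)) = ss.map (· - s) := by
      rw [List.map_map]
      apply List.map_congr_left
      intro c _
      simp only [Function.comp_apply]
      omega
    rw [hdd, hmm]

theorem pvSplits_chain (g : Int) (xs : List Int) :
    List.IsChain (· ≤ ·) (0 :: pvSplits g xs ++ [xs.length]) := by
  apply List.isChain_iff_pairwise.mpr
  have hmem : ∀ i ∈ pvSplits g xs, 1 ≤ i ∧ i < 1 + (xs.length - 1) := by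
    intro i hi
    unfold pvSplits at hi
    have := List.mem_range'.mp (List.mem_of_mem_filter hi)
    omega
  refine List.Pairwise.cons (fun b _ => Nat.zero_le b) ?_
  apply List.pairwise_append.mpr
  refine ⟨?_, List.pairwise_singleton _ _, ?_⟩
  · apply List.Pairwise.imp le_of_lt
    exact List.Pairwise.filter _ (List.pairwise_lt_range' ..)
  · intro i hi b hb
    rw [List.mem_singleton] at hb
    subst hb
    have := hmem i hi
    omega

theorem pvB_splits (g : Int) (xs : List Int) :
    (PySem.List.pyRange 1 (xs.length : Int) 1).filter
      (fun i => decide (g < PySem.List.pyGetD xs i 0 - PySem.List.pyGetD xs (i - 1) 0)) =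
    (pvSplits g xs).map (fun k : Nat => (k : Int)) := by
  rw [PySem.List.pyRange_one]
  have hm : ((xs.length : Int) - 1).toNat = xs.length - 1 := by omega
  rw [hm]
  unfold pvSplits
  rw [List.range'_eq_map_range, List.filter_map, List.filter_map, List.map_map]
  have hfe : ((fun k : Nat => (k : Int)) ∘ fun a => 1 + a) = (fun (k : Nat) => (1 : Int) + k) := by
    funext k; simp only [Function.comp_apply]; push_cast; ring
  rw [hfe]
  refine congrArg _ (List.filter_congr ?_)
  intro k _
  simp only [Function.comp_apply]
  have h1 : (1 : Int) + (k : Int) = ((k + 1 : Nat) : Int) := by push_cast; ring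
  rw [h1]
  rw [show ((k + 1 : Nat) : Int) - 1 = ((k : Nat) : Int) from by push_cast; ring_nf]
  rw [PySem.List.pyGetD_natCast, PySem.List.pyGetD_natCast]
  simp [Nat.add_comm]

theorem pvB_eq_grp (lines : List Int) (g : Int) :
    group_nearby_lines_py_alt lines g = pvGrp g lines := by
  cases lines with
  | nil => rfl
  | cons x rest =>
    show ((((0 : Int) :: ((PySem.List.pyRange 1 (((x :: rest).length : Nat) : Int) 1).filter
        (fun i => decide (g < PySem.List.pyGetD (x :: rest) i 0 - PySem.List.pyGetD (x :: rest) (i - 1) 0))) ++ [(((x :: rest).length : Nat) : Int)]).zip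
          (PySem.List.slice ((0 : Int) :: ((PySem.List.pyRange 1 (((x :: rest).length : Nat) : Int) 1).filter
        (fun i => decide (g < PySem.List.pyGetD (x :: rest) i 0 - PySem.List.pyGetD (x :: rest) (i - 1) 0))) ++ [(((x :: rest).length : Nat) : Int)]) (some 1) none)).map
          (fun ab => PySem.List.slice (x :: rest) (some ab.1) (some ab.2)))
        = pvGrp g (x :: rest)
    rw [pvB_splits]
    have hbounds : (0 : Int) :: (pvSplits g (x :: rest)).map (fun k : Nat => (k : Int))
          ++ [((x :: rest).length : Int)]
        = ((0 :: pvSplits g (x :: rest) ++ [(x :: rest).length]).map (fun k : Nat => (k : Int))) := by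
      simp
    rw [hbounds, PySem.List.slice_from_one]
    have htail : ((0 :: pvSplits g (x :: rest) ++ [(x :: rest).length]).map
          (fun k : Nat => (k : Int))).tail
        = (pvSplits g (x :: rest) ++ [(x :: rest).length]).map (fun k : Nat => (k : Int)) := by
      simp
    rw [htail]
    refine Eq.trans (pvZip_chop (x :: rest) (pvSplits g (x :: rest) ++ [(x :: rest).length]) 0) ?_
    rw [pvChop_eq_pieces _ 0 _ (pvSplits_chain g (x :: rest))]
    rw [List.drop_zero]
    have hms : (pvSplits g (x :: rest)).map (· - 0) = pvSplits g (x :: rest) := by simp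
    rw [hms, ← pvGrp_eq_pieces]

-- ===== VERDICT (by name: the statement is the Claim_ definition above) =====
theorem group_nearby_lines_py_spec : Claim_equal_group_nearby_lines_py := by
  intro lines max_gap _
  show group_nearby_lines_py lines max_gap = group_nearby_lines_py_alt lines max_gap
  rw [pvA_eq_grp, pvB_eq_grp]
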